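-- pv_equiv track=rewrite | github.com/tumffa/aidmx | src/services/ola_dmx_controller.py | _coalesce_identical_frames
-- ===== SOURCE A (Python) =====
-- def _coalesce_identical_frames(frame_delays_ms, dmx_frames):
--     """
--     Merge consecutive identical frames by summing their delays.
--     This can drastically reduce SendDmx call count when many frames don't change.
--     """
--     if not dmx_frames:
--         return frame_delays_ms, dmx_frames
--
--     new_delays = []
--     new_frames = []
--
--     prev = dmx_frames[0]
--     acc_delay = int(frame_delays_ms[0]) if frame_delays_ms else 0
--
--     for i in range(1, len(dmx_frames)):
--         cur = dmx_frames[i]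
--         d = int(frame_delays_ms[i]) if i < len(frame_delays_ms) else 0
--
--         if cur == prev:
--             acc_delay += d
--         else:
--             new_frames.append(prev)
--             new_delays.append(acc_delay)
--             prev = cur
--             acc_delay = d
--
--     new_frames.append(prev)
--     new_delays.append(acc_delay)
--     return new_delays, new_frames
-- ===== SOURCE B (Python) =====
-- def _coalesce_identical_frames(frame_delays_ms, dmx_frames):
--     """Run-based rewrite: an inner scan measures each run of identical
--     consecutive frames, the matching delay slice is summed, and both lists
--     are sliced past the run (alternative decomposition; slicing copies, so not faster)."""
--     if not dmx_frames:
--         return frame_delays_ms, dmx_frames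
--     new_delays, new_frames = [], []
--     delays, frames = list(frame_delays_ms), list(dmx_frames)
--     while frames:
--         head = frames[0]
--         k = 1
--         while k < len(frames) and frames[k] == head:
--             k += 1
--         new_frames.append(head)
--         new_delays.append(sum(int(d) for d in delays[:k]))
--         delays, frames = delays[k:], frames[k:]
--     return new_delays, new_frames
-- ===== Notes on version B (the rewrite author's own statement) =====
-- stated objective: alternative
-- what changed: Replaces A's single index loop carrying prev/acc accumulator state with a run-at-a-time scan: an inner loop measures each run of identical consecutive frames, the matching delay slice is summed in one go, and both lists are sliced past the run.
import Mathlib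
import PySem

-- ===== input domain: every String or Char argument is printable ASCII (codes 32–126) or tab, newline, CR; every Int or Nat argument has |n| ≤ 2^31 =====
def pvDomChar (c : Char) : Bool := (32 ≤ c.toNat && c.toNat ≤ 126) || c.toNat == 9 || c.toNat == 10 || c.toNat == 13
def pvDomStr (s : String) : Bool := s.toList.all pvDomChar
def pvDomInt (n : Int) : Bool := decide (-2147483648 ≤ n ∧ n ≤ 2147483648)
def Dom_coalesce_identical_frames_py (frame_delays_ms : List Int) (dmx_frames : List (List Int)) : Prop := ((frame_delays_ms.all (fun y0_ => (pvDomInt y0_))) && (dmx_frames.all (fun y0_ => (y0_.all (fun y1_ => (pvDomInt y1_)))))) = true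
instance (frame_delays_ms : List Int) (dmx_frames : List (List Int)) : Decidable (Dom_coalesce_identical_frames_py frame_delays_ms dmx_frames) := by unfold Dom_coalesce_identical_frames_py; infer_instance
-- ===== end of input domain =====

-- B replaces A's prev/acc accumulator pass by a run-at-a-time scan that slices both lists past each run (alternative decomposition, not faster).

-- ===== PORT A =====
-- A-side helper: the body of A's `for i in range(1, len(dmx_frames))` loop,
-- state = (new_delays, new_frames, prev, acc_delay).
def pvStepA (frame_delays_ms : List Int) (dmx_frames : List (List Int))
    (s : List Int × List (List Int) × List Int × Int) (i : Nat) :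
    List Int × List (List Int) × List Int × Int :=
  let cur := dmx_frames.getD i []
  -- d = int(frame_delays_ms[i]) if i < len(frame_delays_ms) else 0  (int on int = identity)
  let d : Int := if i < frame_delays_ms.length then frame_delays_ms.getD i 0 else 0
  if cur = s.2.2.1 then (s.1, s.2.1, s.2.2.1, s.2.2.2 + d)
  else (s.1 ++ [s.2.2.2], s.2.1 ++ [s.2.2.1], cur, d)

def coalesce_identical_frames_py (frame_delays_ms : List Int) (dmx_frames : List (List Int)) : List Int × List (List Int) :=
  if dmx_frames = [] then (frame_delays_ms, dmx_frames)
  else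
    let prev0 : List Int := dmx_frames.getD 0 []
    let acc0 : Int := if frame_delays_ms ≠ [] then frame_delays_ms.getD 0 0 else 0
    let st := (List.range' 1 (dmx_frames.length - 1)).foldl
      (pvStepA frame_delays_ms dmx_frames) ([], [], prev0, acc0)
    (st.1 ++ [st.2.2.2], st.2.1 ++ [st.2.2.1])

-- ===== PORT B =====
-- B-side helper: the inner `while k < len(frames) and frames[k] == head` scan (k = 1 + run length of the rest).
def pvRunLen (head : List Int) : List (List Int) → Nat
  | [] => 0
  | c :: t => if c = head then 1 + pvRunLen head t else 0

-- B's outer `while frames:` loop: one run per iteration, slicing both lists past it.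
def pvCoalesceGo : List Int → List (List Int) → List Int × List (List Int)
  | _, [] => ([], [])
  | delays, head :: rest =>
    let k := 1 + pvRunLen head rest
    let total : Int := (delays.take k).sum
    let r := pvCoalesceGo (delays.drop k) ((head :: rest).drop k)
    (total :: r.1, head :: r.2)
termination_by _ frames => frames.length
decreasing_by simp

def coalesce_identical_frames_py_alt (frame_delays_ms : List Int) (dmx_frames : List (List Int)) : List Int × List (List Int) :=
  if dmx_frames = [] then (frame_delays_ms, dmx_frames)
  else pvCoalesceGo frame_delays_ms dmx_frames

-- ===== PRECONDITION & SPEC =====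
def Spec_coalesce_identical_frames_py (frame_delays_ms : List Int) (dmx_frames : List (List Int)) (out : List Int × List (List Int)) : Prop := out = coalesce_identical_frames_py_alt frame_delays_ms dmx_frames
instance (frame_delays_ms : List Int) (dmx_frames : List (List Int)) (out : List Int × List (List Int)) : Decidable (Spec_coalesce_identical_frames_py frame_delays_ms dmx_frames out) := by unfold Spec_coalesce_identical_frames_py; infer_instance

-- ===== CLAIM (what is proved, stated in full; the proofs are below) =====
def Claim_equal_coalesce_identical_frames_py : Prop := ∀ (frame_delays_ms : List Int) (dmx_frames : List (List Int)), Dom_coalesce_identical_frames_py frame_delays_ms dmx_frames → Spec_coalesce_identical_frames_py frame_delays_ms dmx_frames (coalesce_identical_frames_py frame_delays_ms dmx_frames)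

-- ===== LEMMAS AND PROOFS =====

-- the (cur, d) pair list A's loop effectively iterates over, built structurally
def pvMkPairs : List Int → List (List Int) → List (List Int × Int)
  | _, [] => []
  | ds, f :: fs => (f, ds.headD 0) :: pvMkPairs ds.tail fs

-- A's loop, rephrased as structural recursion over the pair list
def pvGP : List (List Int × Int) → List Int → Int → List Int × List (List Int)
  | [], prev, acc => ([acc], [prev])
  | (c, d) :: t, prev, acc =>
    if c = prev then pvGP t prev (acc + d)
    else
      let r := pvGP t c d
      (acc :: r.1, prev :: r.2)

theorem pvCoalesceGo_nil (ds : List Int) : pvCoalesceGo ds [] = ([], []) := by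
  rw [pvCoalesceGo.eq_def]

theorem pvCoalesceGo_cons (ds : List Int) (f : List Int) (fs : List (List Int)) :
    pvCoalesceGo ds (f :: fs) =
    (((ds.take (1 + pvRunLen f fs)).sum)
        :: (pvCoalesceGo (ds.drop (1 + pvRunLen f fs)) ((f :: fs).drop (1 + pvRunLen f fs))).1,
     f :: (pvCoalesceGo (ds.drop (1 + pvRunLen f fs)) ((f :: fs).drop (1 + pvRunLen f fs))).2) := by
  rw [pvCoalesceGo.eq_def]

theorem pv_headD_drop (D : List Int) : ∀ s, (D.drop s).headD 0 = D.getD s 0 := by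
  induction D with
  | nil => intro s; cases s <;> simp [List.getD]
  | cons d ds ih => intro s; cases s <;> simp [List.getD]

theorem pv_guard_getD (D : List Int) (i : Nat) :
    (if i < D.length then D[i]?.getD 0 else 0) = D[i]?.getD 0 := by
  split
  · rfl
  · rename_i h
    rw [List.getElem?_eq_none (by omega : D.length ≤ i)]
    rfl

theorem pv_range_map (F : List (List Int)) (D : List Int) :
    ∀ (n s : Nat), F.length = s + n →
    (List.range' s n).map (fun i => ((F.getD i []), (D.getD i 0))) = pvMkPairs (D.drop s) (F.drop s) := by
  intro n
  induction n with
  | zero => intro s h; simp [List.drop_eq_nil_of_le (by omega : F.length ≤ s), pvMkPairs]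
  | succ n ih =>
    intro s h
    have hs : s < F.length := by omega
    rw [List.range'_succ]
    have hdrop : F.drop s = F[s] :: F.drop (s + 1) := List.drop_eq_getElem_cons hs
    simp only [List.map_cons, hdrop, pvMkPairs, List.tail_drop]
    congr 1
    · rw [List.getD_eq_getElem F [] hs, pv_headD_drop]
    · exact ih (s + 1) (by omega)

theorem pv_foldl_gp :
    ∀ (ps : List (List Int × Int)) nd nf prev acc,
    (let st := (ps.map (fun p => p)).foldl
        (fun s (p : List Int × Int) =>
          if p.1 = s.2.2.1 then (s.1, s.2.1, s.2.2.1, s.2.2.2 + p.2)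
          else (s.1 ++ [s.2.2.2], s.2.1 ++ [s.2.2.1], p.1, p.2)) (nd, nf, prev, acc)
     (st.1 ++ [st.2.2.2], st.2.1 ++ [st.2.2.1]))
    = (nd ++ (pvGP ps prev acc).1, nf ++ (pvGP ps prev acc).2) := by
  intro ps
  induction ps with
  | nil => intro nd nf prev acc; simp [pvGP]
  | cons p t ih =>
    intro nd nf prev acc
    obtain ⟨c, d⟩ := p
    by_cases hc : c = prev
    · simpa [pvGP, hc] using ih nd nf prev (acc + d)
    · simpa [pvGP, hc] using ih (nd ++ [acc]) (nf ++ [prev]) c d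

theorem pv_sum_take_cons (ds : List Int) (j : Nat) :
    (ds.take (1 + j)).sum = ds.headD 0 + (ds.tail.take j).sum := by
  cases ds with
  | nil => simp
  | cons d t => rw [(by omega : 1 + j = j + 1)]; simp

theorem pv_gp_run : ∀ (fs : List (List Int)) (ds : List Int) (f : List Int) (acc : Int),
    pvGP (pvMkPairs ds fs) f acc =
    (match fs.drop (pvRunLen f fs) with
     | [] => ([acc + ((ds.take (pvRunLen f fs)).sum)], [f])
     | c :: t =>
       let r := pvGP (pvMkPairs (ds.drop (pvRunLen f fs)).tail t) c ((ds.drop (pvRunLen f fs)).headD 0)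
       ((acc + ((ds.take (pvRunLen f fs)).sum)) :: r.1, f :: r.2)) := by
  intro fs
  induction fs with
  | nil => intro ds f acc; simp [pvMkPairs, pvGP, pvRunLen]
  | cons c t ih =>
    intro ds f acc
    by_cases hc : c = f
    · subst hc
      have hrl : pvRunLen c (c :: t) = 1 + pvRunLen c t := by simp [pvRunLen]
      rw [hrl]
      have h1 : pvMkPairs ds (c :: t) = (c, ds.headD 0) :: pvMkPairs ds.tail t := rfl
      rw [h1]
      have h2 : pvGP ((c, ds.headD 0) :: pvMkPairs ds.tail t) c acc
          = pvGP (pvMkPairs ds.tail t) c (acc + ds.headD 0) := by simp [pvGP]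
      rw [h2, ih ds.tail c (acc + ds.headD 0)]
      have hdrop : ∀ (l : List Int) (j : Nat), l.tail.drop j = l.drop (1 + j) := by
        intro l j; rw [← List.drop_drop]; simp
      have hdropf : (c :: t).drop (1 + pvRunLen c t) = t.drop (pvRunLen c t) := by
        rw [(by omega : 1 + pvRunLen c t = pvRunLen c t + 1)]; simp
      rw [hdropf, hdrop ds (pvRunLen c t), pv_sum_take_cons]
      cases t.drop (pvRunLen c t) <;> simp [add_assoc]
    · have hrl : pvRunLen f (c :: t) = 0 := by simp [pvRunLen, hc]
      rw [hrl]
      have h1 : pvMkPairs ds (c :: t) = (c, ds.headD 0) :: pvMkPairs ds.tail t := rfl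
      rw [h1]
      simp [pvGP, hc]

theorem pv_go_gp_aux : ∀ (n : Nat) (fs : List (List Int)), fs.length ≤ n →
    ∀ (ds : List Int) (f : List Int),
    pvCoalesceGo ds (f :: fs) = pvGP (pvMkPairs ds.tail fs) f (ds.headD 0) := by
  intro n
  induction n with
  | zero =>
    intro fs hfs ds f
    cases fs with
    | cons a b => simp at hfs
    | nil =>
      rw [pvCoalesceGo_cons]
      have h0 : pvRunLen f [] = 0 := rfl
      rw [h0, show ([f] : List (List Int)).drop (1 + 0) = [] from rfl, pvCoalesceGo_nil]
      rw [show pvMkPairs ds.tail [] = [] from rfl, show pvGP [] f (ds.headD 0) = ([ds.headD 0], [f]) from rfl]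
      cases ds <;> simp
  | succ n ih =>
    intro fs hfs ds f
    rw [pvCoalesceGo_cons]
    rw [pv_gp_run fs ds.tail f (ds.headD 0)]
    have hdropf : (f :: fs).drop (1 + pvRunLen f fs) = fs.drop (pvRunLen f fs) := by
      rw [(by omega : 1 + pvRunLen f fs = pvRunLen f fs + 1)]; simp
    have hdropd : ds.drop (1 + pvRunLen f fs) = ds.tail.drop (pvRunLen f fs) := by
      rw [← List.drop_drop]; simp
    cases hcase : fs.drop (pvRunLen f fs) with
    | nil =>
      rw [hdropf, hcase, pvCoalesceGo_nil, pv_sum_take_cons]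
    | cons c t =>
      have hlen : t.length < fs.length := by
        have := congrArg List.length hcase
        simp at this; omega
      rw [hdropf, hcase]
      rw [ih t (by omega) (ds.drop (1 + pvRunLen f fs)) c]
      rw [hdropd]
      simp [pv_sum_take_cons]

-- ===== VERDICT (by name: the statement is the Claim_ definition above) =====
theorem coalesce_identical_frames_py_spec : Claim_equal_coalesce_identical_frames_py := by
  intro ds fs _
  unfold Spec_coalesce_identical_frames_py
  unfold coalesce_identical_frames_py coalesce_identical_frames_py_alt
  by_cases h : fs = []
  · simp [h]
  · simp only [h, if_false]
    obtain ⟨f, t, rfl⟩ : ∃ f t, fs = f :: t := by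
      cases fs with | nil => exact absurd rfl h | cons a b => exact ⟨a, b, rfl⟩
    have hstep : ∀ (s : List Int × List (List Int) × List Int × Int) (i : Nat),
        pvStepA ds (f :: t) s i =
        (fun s (p : List Int × Int) =>
          if p.1 = s.2.2.1 then (s.1, s.2.1, s.2.2.1, s.2.2.2 + p.2)
          else (s.1 ++ [s.2.2.2], s.2.1 ++ [s.2.2.1], p.1, p.2)) s
          (((f :: t).getD i []), (ds.getD i 0)) := by
      intro s i
      simp [pvStepA, List.getD, pv_guard_getD]
    have hfold : (List.range' 1 ((f :: t).length - 1)).foldl (pvStepA ds (f :: t))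
          ([], [], (f :: t).getD 0 [], if ds ≠ [] then ds.getD 0 0 else 0)
        = (pvMkPairs ds.tail t).foldl
          (fun s (p : List Int × Int) =>
            if p.1 = s.2.2.1 then (s.1, s.2.1, s.2.2.1, s.2.2.2 + p.2)
            else (s.1 ++ [s.2.2.2], s.2.1 ++ [s.2.2.1], p.1, p.2))
          ([], [], (f :: t).getD 0 [], if ds ≠ [] then ds.getD 0 0 else 0) := by
      have hmk : pvMkPairs (ds.drop 1) ((f :: t).drop 1) = pvMkPairs ds.tail t := by
        simp [List.drop_one]
      rw [← hmk, ← pv_range_map (f :: t) ds t.length 1 (by simp; omega)]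
      rw [List.foldl_map]
      congr 1
      funext s i
      exact hstep s i
    have hacc : (if ds ≠ [] then ds.getD 0 0 else 0) = ds.headD 0 := by
      cases ds <;> simp [List.getD]
    have hprev : (f :: t).getD 0 [] = f := rfl
    rw [hfold]
    have := pv_foldl_gp (pvMkPairs ds.tail t) [] [] ((f :: t).getD 0 []) (if ds ≠ [] then ds.getD 0 0 else 0)
    simp only [List.map_id'] at this
    rw [this]
    rw [pv_go_gp_aux t.length t (le_refl _) ds f]
    cases ds <;> simp
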